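-- pv_equiv track=rewrite | github.com/mfaramarzi/Internship_Summer2021 | david/Generators/Anti-Arithmetic/anti-arithmetic.py | solve
-- ===== SOURCE A (Python) =====
-- def solve(n, v, pos):
--     for i in range(len(v)):
--         pos[v[i]] = i
--
--     for s in range(n):
--         for d in range(-n,n+1):
--             if (s+d+d >= 0 and s + d + d < n):
--                 if (pos[s] < pos[s+d] and pos[s+d] < pos[s+d+d]):
--
--                     return "no"
--
--
--     return "yes"
-- ===== SOURCE B (Python) =====
-- def _rev(x, w):
--     r = 0
--     for _ in range(w):
--         r = (r << 1) | (x & 1)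
--         x >>= 1
--     return r
--
--
-- def solve(n, v, pos):
--     for i in range(len(v)):
--         pos[v[i]] = i
--
--     order = sorted(range(n), key=lambda x: pos[x])
--     seen = 0
--     for m in order:
--         w = min(m, n - 1 - m)
--         if w > 0:
--             mask = (1 << w) - 1
--             low = (seen >> (m - w)) & mask
--             high = (seen >> (m + 1)) & mask
--             if _rev(low, w) != high:
--                 return "no"
--         seen |= 1 << m
--     return "yes"
-- ===== Notes on version B (the rewrite author's own statement) =====
-- stated objective: alternative
-- what changed: A enumerates every ordered AP triple (s, s+d, s+2d) for d in [-n,n] under a nested scan of the position table; B instead sorts the values by position, sweeps them once left to right maintaining the set of already-seen values as an integer bitmask, and detects a triple at midpoint m by comparing the bit-reversed window below m against the window above m (a set-symmetry test), relying on the fact that on a permutation an AP triple in order exists iff some midpoint has exactly one endpoint on its earlier side.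
-- outside the precondition, e.g. on solve(3, [], [0, 0, 1, 1]): A returns 'yes', B returns 'no'; on solve(4, [0, -3], [1, 0, 1, 1]): A returns 'yes', B returns 'no'; on solve(1, [5], [0]): A raises IndexError, B raises IndexError
import Mathlib
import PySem

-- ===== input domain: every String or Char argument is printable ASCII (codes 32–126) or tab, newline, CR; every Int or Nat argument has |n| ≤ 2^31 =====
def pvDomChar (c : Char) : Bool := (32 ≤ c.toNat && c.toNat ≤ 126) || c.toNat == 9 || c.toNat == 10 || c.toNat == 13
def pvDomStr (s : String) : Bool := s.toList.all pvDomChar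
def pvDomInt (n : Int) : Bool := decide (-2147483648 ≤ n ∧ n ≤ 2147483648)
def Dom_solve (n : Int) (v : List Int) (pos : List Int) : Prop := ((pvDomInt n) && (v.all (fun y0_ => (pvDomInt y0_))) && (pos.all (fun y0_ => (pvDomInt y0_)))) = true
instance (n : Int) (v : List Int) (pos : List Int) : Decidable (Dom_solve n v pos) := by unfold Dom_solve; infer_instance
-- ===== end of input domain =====

-- B replaces A's quadruple-loop enumeration of AP triples (s, s+d, s+2d) by a single positional
-- sweep over the values sorted by position, maintaining the set of already-seen values as a bitmask
-- and detecting a triple through a bit-reversed window comparison around each midpoint (an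
-- alternative algorithm of the same asymptotic cost). Both A and B overwrite pos in place
-- identically; the equivalence proved here is about the return value only.

-- ===== PORT A =====
-- Python p[x] with a default; exact here since Pre_ keeps every index in [0, len p)
def pyAtA (p : List Int) (x : Int) : Int := PySem.List.pyGetD p x 0

-- 'for i in range(len(v)): pos[v[i]] = i' — structural recursion over v carrying the index i
def fillGoA : List Int → Int → List Int → List Int
  | [], _, p => p
  | x :: xs, i, p => fillGoA xs (i + 1) (PySem.List.pySetD p x i)

def solve (n : Int) (v : List Int) (pos : List Int) : String :=
  let P := fillGoA v 0 pos
  if (PySem.List.pyRange 0 n 1).any (fun s =>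
       (PySem.List.pyRange (-n) (n + 1) 1).any (fun d =>
         (decide (0 ≤ s + d + d) && decide (s + d + d < n)) &&
         (decide (pyAtA P s < pyAtA P (s + d)) && decide (pyAtA P (s + d) < pyAtA P (s + d + d)))))
  then "no" else "yes"

-- ===== PORT B =====
def pyAtB (p : List Int) (x : Int) : Int := PySem.List.pyGetD p x 0

def fillGoB : List Int → Int → List Int → List Int
  | [], _, p => p
  | x :: xs, i, p => fillGoB xs (i + 1) (PySem.List.pySetD p x i)

-- '_rev(x, w)': reverse the low w bits of x (loop 'r = (r << 1) | (x & 1); x >>= 1' run w times)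
def revGo : Nat → Nat → Nat → Nat
  | 0, _, r => r
  | w + 1, x, r => revGo w (x >>> 1) ((r <<< 1) ||| (x &&& 1))

-- the 'for m in order' loop with accumulator 'seen' (a Python int bitmask, always nonnegative,
-- hence a Nat here); every shift amount is nonnegative on reachable states, so .toNat is exact
def sweepGo (n : Int) : List Int → Nat → Bool
  | [], _ => false
  | m :: rest, seen =>
    let w := min m (n - 1 - m)
    if 0 < w then
      let mask := (1 <<< w.toNat) - 1
      let low := (seen >>> (m - w).toNat) &&& mask
      let high := (seen >>> (m + 1).toNat) &&& mask
      if revGo w.toNat low 0 ≠ high then true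
      else sweepGo n rest (seen ||| (1 <<< m.toNat))
    else sweepGo n rest (seen ||| (1 <<< m.toNat))

def solve_alt (n : Int) (v : List Int) (pos : List Int) : String :=
  let P := fillGoB v 0 pos
  let order := PySem.List.sorted (PySem.List.pyRange 0 n 1) (fun x => pyAtB P x) false
  if sweepGo n order 0 then "no" else "yes"

-- ===== PRECONDITION & SPEC =====
-- The value the scan reads at cell k: the index of the last write into k (last occurrence of k
-- in v), or the original entry pos[k] if the fill never writes there.
def finalVal (v pos : List Int) (k : Int) : Int :=
  match v.reverse.findIdx? (fun x => x == k || x == k - (pos.length : Int)) with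
  | some r => (v.length : Int) - 1 - (r : Int)
  | none => PySem.List.pyGetD pos k 0

-- Pre_ excludes the inputs on which A raises IndexError (a value of v outside [-len(pos), len(pos)),
-- or 0 < n with n > len(pos) reached by the scan) and, when the scan runs (0 < n), the inputs whose
-- scanned cells 0..n-1 carry duplicate values — a corner no caller specifies (v is meant to be a
-- permutation writing every cell), on which A's and B's answers are both defensible tie-breaks.
def Pre_solve (n : Int) (v : List Int) (pos : List Int) : Prop :=
  (∀ x ∈ v, -(pos.length : Int) ≤ x ∧ x < (pos.length : Int)) ∧
  (0 < n →
    n ≤ (pos.length : Int) ∧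
    ∀ j ∈ PySem.List.pyRange 0 n 1, ∀ k ∈ PySem.List.pyRange 0 n 1,
      j < k → finalVal v pos j ≠ finalVal v pos k)
instance (n : Int) (v : List Int) (pos : List Int) : Decidable (Pre_solve n v pos) := by
  unfold Pre_solve; infer_instance

def pvWitness_solve : Int × List Int × List Int := (4, [2, 0, 3, 1], [0, 0, 0, 0])

def Spec_solve (n : Int) (v : List Int) (pos : List Int) (out : String) : Prop := out = solve_alt n v pos
instance (n : Int) (v : List Int) (pos : List Int) (out : String) : Decidable (Spec_solve n v pos out) := by
  unfold Spec_solve; infer_instance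

-- ===== CLAIM (what is proved, stated in full; the proofs are below) =====
def Claim_equal_solve : Prop := ∀ (n : Int) (v : List Int) (pos : List Int), Dom_solve n v pos → Pre_solve n v pos → Spec_solve n v pos (solve n v pos)

-- ===== LEMMAS AND PROOFS =====

theorem fillB_eq_fillA (xs : List Int) (i : Int) (p : List Int) :
    fillGoB xs i p = fillGoA xs i p := by
  induction xs generalizing i p with
  | nil => rfl
  | cons x xs ih => simp [fillGoA, fillGoB, ih]

theorem pyGetD_nonneg_eq (q : List Int) (x : Int) (hx : 0 ≤ x) :
    PySem.List.pyGetD q x 0 = q.getD x.toNat 0 := by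
  have h : x = ((x.toNat : Nat) : Int) := (Int.toNat_of_nonneg hx).symm
  conv_lhs => rw [h]
  rw [PySem.List.pyGetD_natCast]

theorem pyGetD_pySetD_general (p : List Int) (x i k : Int)
    (hx0 : -(p.length : Int) ≤ x) (hx1 : x < (p.length : Int))
    (hk0 : 0 ≤ k) (hk1 : k < (p.length : Int)) :
    PySem.List.pyGetD (PySem.List.pySetD p x i) k 0 =
      if x = k ∨ x = k - (p.length : Int) then i else PySem.List.pyGetD p k 0 := by
  set e : Nat := if 0 ≤ x then x.toNat else p.length - (-x).toNat with he
  have hidx : PySem.List.pyIdx? p.length x = some e := by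
    simp only [PySem.List.pyIdx?]
    by_cases h : 0 ≤ x
    · rw [if_pos h, if_pos (by omega : x < ((p.length : Nat) : Int))]
      simp only [he, if_pos h]
    · rw [if_neg h, if_pos (by omega : -((p.length : Nat) : Int) ≤ x)]
      simp only [he, if_neg h]
  have hset : PySem.List.pySetD p x i = p.set e i := by
    simp [PySem.List.pySetD, PySem.List.pySet?, hidx]
  have helt : e < p.length := by simp only [he]; split_ifs <;> omega
  rw [hset, pyGetD_nonneg_eq _ _ hk0, pyGetD_nonneg_eq _ _ hk0]
  by_cases hhit : x = k ∨ x = k - (p.length : Int)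
  · have hek : e = k.toNat := by
      simp only [he]
      rcases hhit with h | h <;> split_ifs <;> omega
    rw [if_pos hhit, hek]
    simp [List.getD]
    rw [List.getElem?_set_self (by omega)]
    simp
  · have hhit' := hhit
    rw [not_or] at hhit'
    have hek : e ≠ k.toNat := by
      simp only [he]
      rcases hhit' with ⟨h1, h2⟩
      split_ifs <;> omega
    rw [if_neg hhit]
    simp [List.getD]
    rw [List.getElem?_set_ne (by omega)]

theorem length_fillA (xs : List Int) (i : Int) (p : List Int) :
    (fillGoA xs i p).length = p.length := by
  induction xs generalizing i p with
  | nil => rfl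
  | cons x xs ih => simp [fillGoA, ih, PySem.List.length_pySetD]

theorem fill_append (xs : List Int) (x i : Int) (p : List Int) :
    fillGoA (xs ++ [x]) i p =
      PySem.List.pySetD (fillGoA xs i p) x (i + (xs.length : Int)) := by
  induction xs generalizing i p with
  | nil => simp [fillGoA]
  | cons y ys ih =>
    simp only [List.cons_append, fillGoA, ih]
    congr 1
    simp
    ring

theorem fill_final_gen (v : List Int) (p : List Int) (i k : Int)
    (hb : ∀ x ∈ v, -(p.length : Int) ≤ x ∧ x < (p.length : Int))
    (hk0 : 0 ≤ k) (hk1 : k < (p.length : Int)) :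
    PySem.List.pyGetD (fillGoA v i p) k 0 =
      match v.reverse.findIdx? (fun x => x == k || x == k - (p.length : Int)) with
      | some r => i + ((v.length : Int) - 1 - (r : Int))
      | none => PySem.List.pyGetD p k 0 := by
  induction v using List.reverseRecOn with
  | nil => simp [fillGoA]
  | append_singleton xs x ih =>
    rw [fill_append]
    have hxb := hb x (by simp)
    have hFlen : (fillGoA xs i p).length = p.length := length_fillA xs i p
    have hgen := pyGetD_pySetD_general (fillGoA xs i p) x (i + (xs.length : Int)) k
      (by rw [hFlen]; exact hxb.1) (by rw [hFlen]; exact hxb.2) hk0 (by rw [hFlen]; exact hk1)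
    rw [hFlen] at hgen
    rw [hgen, List.reverse_append]
    simp only [List.reverse_cons, List.reverse_nil, List.nil_append, List.singleton_append,
      List.findIdx?_cons]
    by_cases hhit : x = k ∨ x = k - (p.length : Int)
    · rw [if_pos hhit, if_pos (by simp; omega)]
      simp
    · rw [if_neg hhit, if_neg (by simp; omega)]
      rw [ih (fun z hz => hb z (by simp [hz]))]
      cases hfi : xs.reverse.findIdx? (fun z => z == k || z == k - (p.length : Int)) with
      | none => simp
      | some r =>
        simp
        ring

theorem fill_final (v pos : List Int)
    (hb : ∀ x ∈ v, -(pos.length : Int) ≤ x ∧ x < (pos.length : Int))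
    (k : Int) (hk0 : 0 ≤ k) (hk1 : k < (pos.length : Int)) :
    PySem.List.pyGetD (fillGoA v 0 pos) k 0 = finalVal v pos k := by
  rw [fill_final_gen v pos 0 k hb hk0 hk1, finalVal]
  cases v.reverse.findIdx? (fun x => x == k || x == k - (pos.length : Int)) <;> simp

-- 'A found a triple centred at m': some radius e has exactly one endpoint at an earlier position
def badAt (P : List Int) (n m : Int) : Prop :=
  ∃ e : Int, 1 ≤ e ∧ e ≤ min m (n - 1 - m) ∧
    ¬ (PySem.List.pyGetD P (m - e) 0 < PySem.List.pyGetD P m 0 ↔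
       PySem.List.pyGetD P (m + e) 0 < PySem.List.pyGetD P m 0)

theorem A_iff (n : Int) (P : List Int)
    (hinj : ∀ x y : Int, 0 ≤ x → x < n → 0 ≤ y → y < n → x ≠ y →
      PySem.List.pyGetD P x 0 ≠ PySem.List.pyGetD P y 0) :
    ((PySem.List.pyRange 0 n 1).any (fun s =>
       (PySem.List.pyRange (-n) (n + 1) 1).any (fun d =>
         (decide (0 ≤ s + d + d) && decide (s + d + d < n)) &&
         (decide (pyAtA P s < pyAtA P (s + d)) && decide (pyAtA P (s + d) < pyAtA P (s + d + d))))) = true)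
    ↔ ∃ m : Int, (0 ≤ m ∧ m < n) ∧ badAt P n m := by
  simp only [List.any_eq_true, PySem.List.mem_pyRange_one, Bool.and_eq_true,
    decide_eq_true_eq, pyAtA]
  constructor
  · rintro ⟨s, ⟨hs0, hs1⟩, d, ⟨hd0, hd1⟩, ⟨h1, h2⟩, h3, h4⟩
    have hdne : d ≠ 0 := by rintro rfl; simp at h3
    by_cases hdpos : 0 < d
    · refine ⟨s + d, ⟨by omega, by omega⟩, d, by omega, by omega, ?_⟩
      rw [show s + d - d = s by ring, show s + d + d = s + d + d from rfl]
      intro hiff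
      exact absurd (hiff.mp h3) (lt_asymm h4)
    · refine ⟨s + d, ⟨by omega, by omega⟩, -d, by omega, by omega, ?_⟩
      rw [show s + d - -d = s + d + d by ring, show s + d + -d = s by ring]
      intro hiff
      exact absurd (hiff.mpr h3) (lt_asymm h4)
  · rintro ⟨m, ⟨hm0, hm1⟩, e, he1, he2, hstep⟩
    have he2' : e ≤ m ∧ e ≤ n - 1 - m := by constructor <;> omega
    have hne1 : PySem.List.pyGetD P (m - e) 0 ≠ PySem.List.pyGetD P m 0 :=
      hinj _ _ (by omega) (by omega) (by omega) (by omega) (by omega)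
    have hne2 : PySem.List.pyGetD P (m + e) 0 ≠ PySem.List.pyGetD P m 0 :=
      hinj _ _ (by omega) (by omega) (by omega) (by omega) (by omega)
    by_cases hL : PySem.List.pyGetD P (m - e) 0 < PySem.List.pyGetD P m 0
    · have hR : ¬ PySem.List.pyGetD P (m + e) 0 < PySem.List.pyGetD P m 0 :=
        fun h => hstep ⟨fun _ => h, fun _ => hL⟩
      have hR' : PySem.List.pyGetD P m 0 < PySem.List.pyGetD P (m + e) 0 :=
        lt_of_le_of_ne (not_lt.mp hR) (Ne.symm hne2)
      refine ⟨m - e, ⟨by omega, by omega⟩, e, ⟨by omega, by omega⟩,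
        ⟨⟨by omega, by omega⟩, ?_, ?_⟩⟩
      · rw [show m - e + e = m by ring]; exact hL
      · rw [show m - e + e = m by ring]; exact hR'
    · have hR : PySem.List.pyGetD P (m + e) 0 < PySem.List.pyGetD P m 0 := by
        by_contra h
        exact hstep ⟨fun hl => absurd hl hL, fun hr => absurd hr h⟩
      have hL' : PySem.List.pyGetD P m 0 < PySem.List.pyGetD P (m - e) 0 :=
        lt_of_le_of_ne (not_lt.mp hL) (Ne.symm hne1)
      refine ⟨m + e, ⟨by omega, by omega⟩, -e, ⟨by omega, by omega⟩,
        ⟨⟨by omega, by omega⟩, ?_, ?_⟩⟩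
      · rw [show m + e + -e = m by ring]; exact hR
      · rw [show m + e + -e = m by ring, show m + -e = m - e by ring]; exact hL'

theorem revGo_testBit (w : Nat) : ∀ (x r i : Nat),
    (revGo w x r).testBit i = if i < w then x.testBit (w - 1 - i) else r.testBit (i - w) := by
  induction w with
  | zero => intro x r i; simp [revGo]
  | succ w ih =>
    intro x r i
    rw [revGo, ih]
    by_cases hi : i < w
    · rw [if_pos hi, if_pos (by omega), Nat.testBit_shiftRight]
      congr 1
      omega
    · by_cases hi' : i < w + 1
      · have hiw : i = w := by omega
        rw [if_neg hi, if_pos hi', hiw]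
        simp only [Nat.sub_self, Nat.testBit_or, Nat.testBit_shiftLeft, Nat.testBit_and]
        have h1 : (1 : Nat).testBit 0 = true := by decide
        simp [h1]
      · rw [if_neg hi, if_neg hi']
        simp only [Nat.testBit_or, Nat.testBit_shiftLeft, Nat.testBit_and]
        have hge : 1 ≤ i - w := by omega
        have h1 : (1 : Nat).testBit (i - w) = false := by
          have : i - w ≠ 0 := by omega
          cases h : (1 : Nat).testBit (i - w)
          · rfl
          · exact absurd (Nat.testBit_one_eq_true_iff_self_eq_zero.mp h) this
        rw [h1]
        simp only [Bool.and_false, Bool.or_false]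
        rw [decide_eq_true hge, Bool.true_and]
        congr 1

theorem rev_eq_iff (w low high : Nat) (hh : high < 2 ^ w) :
    revGo w low 0 = high ↔ ∀ t, t < w → low.testBit (w - 1 - t) = high.testBit t := by
  constructor
  · intro h t ht
    rw [← h, revGo_testBit, if_pos ht]
  · intro h
    apply Nat.eq_of_testBit_eq
    intro i
    by_cases hi : i < w
    · rw [revGo_testBit, if_pos hi]
      exact h i hi
    · rw [revGo_testBit, if_neg hi, Nat.zero_testBit]
      exact (Nat.testBit_lt_two_pow (lt_of_lt_of_le hh (Nat.pow_le_pow_right (by omega) (by omega)))).symm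

theorem mask_testBit (seen a w t : Nat) :
    ((seen >>> a) &&& ((1 <<< w) - 1)).testBit t = (seen.testBit (a + t) && decide (t < w)) := by
  rw [Nat.testBit_and, Nat.testBit_shiftRight, Nat.one_shiftLeft, Nat.testBit_two_pow_sub_one]

theorem step_iff (P : List Int) (n m : Int) (seen : Nat) (hm0 : 0 ≤ m) (hm1 : m < n)
    (hw : 0 < min m (n - 1 - m))
    (Hseen : ∀ x : Int, 0 ≤ x → x < n →
      ((seen.testBit x.toNat = true) ↔ PySem.List.pyGetD P x 0 < PySem.List.pyGetD P m 0)) :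
    (revGo (min m (n - 1 - m)).toNat
        ((seen >>> (m - min m (n - 1 - m)).toNat) &&& ((1 <<< (min m (n - 1 - m)).toNat) - 1)) 0
      ≠ ((seen >>> (m + 1).toNat) &&& ((1 <<< (min m (n - 1 - m)).toNat) - 1)))
    ↔ badAt P n m := by
  set w : Int := min m (n - 1 - m) with hwdef
  have hwm : w ≤ m := min_le_left _ _
  have hwn : w ≤ n - 1 - m := min_le_right _ _
  have hhigh : ((seen >>> (m + 1).toNat) &&& ((1 <<< w.toNat) - 1)) < 2 ^ w.toNat := by
    apply Nat.and_lt_two_pow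
    rw [Nat.one_shiftLeft]
    exact Nat.sub_lt (Nat.pow_pos (by omega)) (by omega)
  rw [ne_eq, rev_eq_iff _ _ _ hhigh]
  rw [not_forall]
  constructor
  · rintro ⟨t, ht⟩
    rw [Classical.not_imp] at ht
    obtain ⟨htw, hne⟩ := ht
    rw [mask_testBit, mask_testBit] at hne
    have htw' : w.toNat - 1 - t < w.toNat := by omega
    rw [decide_eq_true htw', decide_eq_true htw, Bool.and_true, Bool.and_true] at hne
    -- indices: (m-w).toNat + (w.toNat-1-t) = (m - 1 - t).toNat ; (m+1).toNat + t = (m + 1 + t).toNat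
    refine ⟨(t : Int) + 1, by omega, by omega, ?_⟩
    have hx1 : ((m - ((t : Int) + 1)).toNat) = (m - w).toNat + (w.toNat - 1 - t) := by omega
    have hx2 : ((m + ((t : Int) + 1)).toNat) = (m + 1).toNat + t := by omega
    rw [← Hseen (m - ((t : Int) + 1)) (by omega) (by omega),
        ← Hseen (m + ((t : Int) + 1)) (by omega) (by omega), hx1, hx2]
    intro hiff
    apply hne
    cases h1 : seen.testBit ((m - w).toNat + (w.toNat - 1 - t)) with
    | true => exact (hiff.mp (by rw [← h1])).symm
    | false =>
      cases h2 : seen.testBit ((m + 1).toNat + t) with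
      | true => exact absurd (hiff.mpr (by rw [← h2])) (by simp [h1])
      | false => rfl
  · rintro ⟨e, he1, he2, hne⟩
    refine ⟨(e - 1).toNat, ?_⟩
    rw [Classical.not_imp]
    have htw : (e - 1).toNat < w.toNat := by omega
    refine ⟨htw, ?_⟩
    rw [mask_testBit, mask_testBit]
    rw [decide_eq_true (by omega : w.toNat - 1 - (e-1).toNat < w.toNat),
        decide_eq_true htw, Bool.and_true, Bool.and_true]
    have hx1 : (m - w).toNat + (w.toNat - 1 - (e - 1).toNat) = (m - e).toNat := by omega
    have hx2 : (m + 1).toNat + (e - 1).toNat = (m + e).toNat := by omega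
    rw [hx1, hx2]
    intro heq
    apply hne
    rw [← Hseen (m - e) (by omega) (by omega), ← Hseen (m + e) (by omega) (by omega), heq]

theorem badAt_false (P : List Int) (n m : Int) (hw : ¬ 0 < min m (n - 1 - m)) :
    ¬ badAt P n m := by
  rintro ⟨e, he1, he2, _⟩
  omega

theorem sweep_iff (P : List Int) (n : Int)
    (hinj : ∀ x y : Int, 0 ≤ x → x < n → 0 ≤ y → y < n → x ≠ y →
      PySem.List.pyGetD P x 0 ≠ PySem.List.pyGetD P y 0) :
    ∀ (L : List Int) (seen : Nat),
      (∀ m ∈ L, 0 ≤ m ∧ m < n) →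
      L.Pairwise (fun a b => PySem.List.pyGetD P a 0 ≤ PySem.List.pyGetD P b 0) →
      L.Nodup →
      (∀ x : Int, 0 ≤ x → x < n → ((seen.testBit x.toNat = true) ↔ x ∉ L)) →
      (∀ x : Int, 0 ≤ x → x < n → x ∉ L →
        ∀ m ∈ L, PySem.List.pyGetD P x 0 < PySem.List.pyGetD P m 0) →
      ((sweepGo n L seen = true) ↔ ∃ m ∈ L, badAt P n m) := by
  intro L
  induction L with
  | nil => intro seen _ _ _ _ _; simp [sweepGo]
  | cons m rest ih =>
    intro seen hmem hpair hnd H1 H2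
    have hm0 : 0 ≤ m := (hmem m (by simp)).1
    have hm1 : m < n := (hmem m (by simp)).2
    have hpairm : ∀ b ∈ rest, PySem.List.pyGetD P m 0 ≤ PySem.List.pyGetD P b 0 :=
      (List.pairwise_cons.mp hpair).1
    have hndm : m ∉ rest := (List.nodup_cons.mp hnd).1
    -- the seen bits describe exactly the values positioned before m
    have Hm : ∀ x : Int, 0 ≤ x → x < n →
        ((seen.testBit x.toNat = true) ↔ PySem.List.pyGetD P x 0 < PySem.List.pyGetD P m 0) := by
      intro x hx0 hx1
      rw [H1 x hx0 hx1]
      constructor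
      · intro hxL
        exact H2 x hx0 hx1 hxL m (by simp)
      · intro hlt hxL
        rcases List.mem_cons.mp hxL with rfl | hxr
        · exact absurd hlt (lt_irrefl _)
        · exact absurd hlt (not_lt.mpr (hpairm x hxr))
    -- invariants after marking m as seen
    have H1' : ∀ x : Int, 0 ≤ x → x < n →
        (((seen ||| (1 <<< m.toNat)).testBit x.toNat = true) ↔ x ∉ rest) := by
      intro x hx0 hx1
      rw [Nat.testBit_or, Nat.one_shiftLeft, Bool.or_eq_true, H1 x hx0 hx1]
      constructor
      · rintro (hxL | hbit)
        · intro hxr; exact hxL (by simp [hxr])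
        · have hxm : x.toNat = m.toNat := by
            by_contra hne
            rw [Nat.testBit_two_pow_of_ne (fun h => hne h.symm)] at hbit
            exact Bool.false_ne_true hbit
          have : x = m := by omega
          rw [this]; exact hndm
      · intro hxr
        by_cases hxm : x = m
        · right; rw [hxm, Nat.testBit_two_pow_self]
        · left; intro hxL
          rcases List.mem_cons.mp hxL with h | h
          · exact hxm h
          · exact hxr h
    have H2' : ∀ x : Int, 0 ≤ x → x < n → x ∉ rest →
        ∀ m2 ∈ rest, PySem.List.pyGetD P x 0 < PySem.List.pyGetD P m2 0 := by
      intro x hx0 hx1 hxr m2 hm2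
      by_cases hxm : x = m
      · subst hxm
        have hm2b := hmem m2 (by simp [hm2])
        exact lt_of_le_of_ne (hpairm m2 hm2)
          (hinj x m2 hx0 hx1 hm2b.1 hm2b.2 (fun h => hndm (h ▸ hm2)))
      · have hxL : x ∉ m :: rest := by
          intro hxL
          rcases List.mem_cons.mp hxL with h | h
          · exact hxm h
          · exact hxr h
        exact H2 x hx0 hx1 hxL m2 (by simp [hm2])
    have hrec := ih (seen ||| (1 <<< m.toNat)) (fun a ha => hmem a (by simp [ha]))
      (List.pairwise_cons.mp hpair).2 (List.nodup_cons.mp hnd).2 H1' H2'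
    by_cases hw : 0 < min m (n - 1 - m)
    · have hstep := step_iff P n m seen hm0 hm1 hw Hm
      simp only [sweepGo, if_pos hw]
      by_cases htest : revGo (min m (n - 1 - m)).toNat
          ((seen >>> (m - min m (n - 1 - m)).toNat) &&& ((1 <<< (min m (n - 1 - m)).toNat) - 1)) 0
        ≠ ((seen >>> (m + 1).toNat) &&& ((1 <<< (min m (n - 1 - m)).toNat) - 1))
      · rw [if_pos htest]
        simp only [true_iff]
        exact ⟨m, by simp, hstep.mp htest⟩
      · rw [if_neg htest, hrec]
        constructor
        · rintro ⟨m2, hm2, hb⟩; exact ⟨m2, by simp [hm2], hb⟩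
        · rintro ⟨m2, hm2, hb⟩
          rcases List.mem_cons.mp hm2 with rfl | h
          · exact absurd (hstep.mpr hb) htest
          · exact ⟨m2, h, hb⟩
    · simp only [sweepGo, if_neg hw]
      rw [hrec]
      constructor
      · rintro ⟨m2, hm2, hb⟩; exact ⟨m2, by simp [hm2], hb⟩
      · rintro ⟨m2, hm2, hb⟩
        rcases List.mem_cons.mp hm2 with rfl | h
        · exact absurd hb (badAt_false P n m2 hw)
        · exact ⟨m2, h, hb⟩

-- ===== VERDICT (by name: the statement is the Claim_ definition above) =====
theorem solve_spec : Claim_equal_solve := by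
  unfold Claim_equal_solve
  intro n v pos _ hpre
  obtain ⟨hwr, hrun⟩ := hpre
  unfold Spec_solve
  simp only [solve, solve_alt]
  rw [fillB_eq_fillA]
  by_cases hn : 0 < n
  · obtain ⟨hlen, hdist⟩ := hrun hn
    set P := fillGoA v 0 pos with hP
    have hfin : ∀ k : Int, 0 ≤ k → k < n →
        PySem.List.pyGetD P k 0 = finalVal v pos k :=
      fun k h0 h1 => fill_final v pos hwr k h0 (by omega)
    have hinj : ∀ x y : Int, 0 ≤ x → x < n → 0 ≤ y → y < n → x ≠ y →
        PySem.List.pyGetD P x 0 ≠ PySem.List.pyGetD P y 0 := by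
      intro x y hx0 hx1 hy0 hy1 hne
      rw [hfin x hx0 hx1, hfin y hy0 hy1]
      rcases lt_or_gt_of_ne hne with h | h
      · exact hdist x (PySem.List.mem_pyRange_one.mpr ⟨hx0, hx1⟩)
          y (PySem.List.mem_pyRange_one.mpr ⟨hy0, hy1⟩) h
      · exact (hdist y (PySem.List.mem_pyRange_one.mpr ⟨hy0, hy1⟩)
          x (PySem.List.mem_pyRange_one.mpr ⟨hx0, hx1⟩) h).symm
    set L := PySem.List.sorted (PySem.List.pyRange 0 n 1) (fun x => pyAtB P x) false with hL
    have hperm : L.Perm (PySem.List.pyRange 0 n 1) := PySem.List.sorted_perm _ _ _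
    have hmemL : ∀ x : Int, x ∈ L ↔ (0 ≤ x ∧ x < n) := by
      intro x
      rw [hperm.mem_iff, PySem.List.mem_pyRange_one]
    have hsweep := sweep_iff P n hinj L 0
      (fun m hm => (hmemL m).mp hm)
      (by
        have := PySem.List.sorted_pairwise (PySem.List.pyRange 0 n 1) (fun x => pyAtB P x)
        simpa [pyAtB] using this)
      (hperm.nodup_iff.mpr (PySem.List.nodup_pyRange_one 0 n))
      (by
        intro x hx0 hx1
        rw [Nat.zero_testBit]
        exact ⟨fun h => absurd h Bool.false_ne_true,
          fun hxL => absurd ((hmemL x).mpr ⟨hx0, hx1⟩) hxL⟩)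
      (by
        intro x hx0 hx1 hxL
        exact absurd ((hmemL x).mpr ⟨hx0, hx1⟩) hxL)
    have hA := A_iff n P hinj
    have hbool : ((PySem.List.pyRange 0 n 1).any (fun s =>
       (PySem.List.pyRange (-n) (n + 1) 1).any (fun d =>
         (decide (0 ≤ s + d + d) && decide (s + d + d < n)) &&
         (decide (pyAtA P s < pyAtA P (s + d)) && decide (pyAtA P (s + d) < pyAtA P (s + d + d))))))
        = sweepGo n L 0 := by
      rw [Bool.eq_iff_iff, hA, hsweep]
      constructor
      · rintro ⟨m, hm, hb⟩; exact ⟨m, (hmemL m).mpr hm, hb⟩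
      · rintro ⟨m, hm, hb⟩; exact ⟨m, (hmemL m).mp hm, hb⟩
    rw [hbool]
  · rw [PySem.List.pyRange_one_eq_nil (by omega)]
    rfl
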